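-- pv_equiv track=rewrite | github.com/matoototo/aoc-2024 | 05/05.py | part1
-- ===== SOURCE A (Python) =====
-- from collections import defaultdict
--
-- def update_valid(before_map, update):
--     for i, before in enumerate(update):
--         for after in update[i:]:
--             if before in before_map[after]: return False
--     return True
--
-- def part1(rules, updates):
--     before_map = defaultdict(set) # key must be before all values
--     for rule in rules:
--         before, after = rule[0], rule[1]
--         before_map[before].add(after)
--
--     # while True:
--     #     new_before_map = iter_closure(before_map)
--     #     if new_before_map == before_map: break
--     #     before_map = new_before_map
--
--     sum = 0
--     for update in updates:
--         if not update_valid(before_map, update): continue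
--         sum += update[len(update) // 2]
--     return sum
-- ===== SOURCE B (Python) =====
-- def part1(rules, updates):
--     before_map = {}
--     for rule in rules:
--         before_map.setdefault(rule[0], set()).add(rule[1])
--
--     total = 0
--     for update in updates:
--         seen = set()
--         ok = True
--         for p in update:
--             seen.add(p)
--             if not seen.isdisjoint(before_map.get(p, ())):
--                 ok = False
--                 break
--         if ok:
--             total += update[len(update) // 2]
--     return total
-- ===== Notes on version B (the rewrite author's own statement) =====
-- stated objective: faster
-- what changed: Validity is decided by a single forward pass per update with an incrementally grown 'seen' set tested against each page's direct-rule set (with early exit), replacing the all-pairs nested scan over enumerate(update) x update[i:].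
import Mathlib
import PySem

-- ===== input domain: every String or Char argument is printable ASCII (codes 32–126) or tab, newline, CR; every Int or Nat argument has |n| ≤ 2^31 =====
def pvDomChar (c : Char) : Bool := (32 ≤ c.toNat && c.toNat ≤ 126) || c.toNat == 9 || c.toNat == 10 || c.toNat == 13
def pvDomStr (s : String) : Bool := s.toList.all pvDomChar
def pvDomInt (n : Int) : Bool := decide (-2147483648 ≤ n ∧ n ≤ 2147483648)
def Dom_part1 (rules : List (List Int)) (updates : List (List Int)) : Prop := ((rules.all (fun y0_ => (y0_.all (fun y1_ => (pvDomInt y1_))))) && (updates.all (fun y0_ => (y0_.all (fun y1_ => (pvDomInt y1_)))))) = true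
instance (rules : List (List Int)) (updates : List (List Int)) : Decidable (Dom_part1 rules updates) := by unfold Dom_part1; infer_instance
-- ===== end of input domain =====

-- B replaces A's all-pairs nested scan per update by a single forward pass with an incrementally grown
-- 'seen' set (objective: alternative single-pass algorithm; same results on all admitted inputs).

-- ===== PORT A =====
-- 'before in before_map[after]' (defaultdict read; auto-insertion is unobservable, the map is only read)
def pvMemA (bm : PySem.Dict Int (PySem.Set Int)) (before after : Int) : Bool :=
  PySem.Set.contains (bm.getD after PySem.Set.empty) before

-- update_valid: the loop 'for i, before in enumerate(update)' with inner loop over the slice update[i:]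
-- is recursion on suffixes (the index i is used only to form that suffix); 'return False' = List.any hit.
def update_valid (bm : PySem.Dict Int (PySem.Set Int)) : List Int → Bool
  | [] => true
  | before :: rest =>
      if (before :: rest).any (fun after => pvMemA bm before after) then false
      else update_valid bm rest

-- 'before_map[before].add(after)' on a defaultdict(set) is d[k] = d.get(k, set()) ∪ {after} = Dict.modify
def pvBuildA (rules : List (List Int)) : PySem.Dict Int (PySem.Set Int) :=
  rules.foldl (fun d rule =>
      let before := (PySem.List.pyGet? rule 0).getD 0   -- rule[0]; Pre_ guarantees it exists
      let after  := (PySem.List.pyGet? rule 1).getD 0   -- rule[1]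
      d.modify before PySem.Set.empty (fun s => s.add after))
    PySem.Dict.empty

def part1 (rules : List (List Int)) (updates : List (List Int)) : Int :=
  let bm := pvBuildA rules
  updates.foldl (fun sum update =>
      if !update_valid bm update then sum   -- 'continue'
      else sum + (PySem.List.pyGet? update (PySem.Int.floordiv update.length 2)).getD 0)
    0                                        -- update[len(update)//2]; Pre_ guarantees update ≠ []

-- ===== PORT B =====
-- 'before_map.setdefault(rule[0], set()).add(rule[1])'
def pvBuildB (rules : List (List Int)) : PySem.Dict Int (PySem.Set Int) :=
  rules.foldl (fun d rule =>
      let b := (PySem.List.pyGet? rule 0).getD 0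
      let a := (PySem.List.pyGet? rule 1).getD 0
      let d' := d.setdefault b PySem.Set.empty
      d'.insert b ((d'.getD b PySem.Set.empty).add a))
    PySem.Dict.empty

-- the forward pass: 'seen.add(p); if not seen.isdisjoint(before_map.get(p, ())): invalid (break)'
def pvCheckB (bm : PySem.Dict Int (PySem.Set Int)) (seen : PySem.Set Int) : List Int → Bool
  | [] => true
  | p :: rest =>
      let seen' := PySem.Set.add seen p
      if PySem.Set.isdisjoint seen' (bm.getD p PySem.Set.empty) then pvCheckB bm seen' rest
      else false

def part1_alt (rules : List (List Int)) (updates : List (List Int)) : Int :=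
  let bm := pvBuildB rules
  updates.foldl (fun total update =>
      if pvCheckB bm PySem.Set.empty update then
        total + (PySem.List.pyGet? update (PySem.Int.floordiv update.length 2)).getD 0
      else total)
    0

-- ===== PRECONDITION & SPEC =====
-- Pre_ excludes exactly the inputs where the Python A raises IndexError: a rule shorter than 2
-- (rule[1]) or an empty update (update[len(update)//2]); B raises there too.
def Pre_part1 (rules : List (List Int)) (updates : List (List Int)) : Prop :=
  (∀ r ∈ rules, 2 ≤ r.length) ∧ (∀ u ∈ updates, u ≠ [])
instance (rules : List (List Int)) (updates : List (List Int)) : Decidable (Pre_part1 rules updates) := by unfold Pre_part1; infer_instance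

def pvWitness_part1 : List (List Int) × List (List Int) :=
  ([[47, 53], [97, 13]], [[47, 53, 13], [53, 47]])

def Spec_part1 (rules : List (List Int)) (updates : List (List Int)) (out : Int) : Prop := out = part1_alt rules updates
instance (rules : List (List Int)) (updates : List (List Int)) (out : Int) : Decidable (Spec_part1 rules updates out) := by unfold Spec_part1; infer_instance

-- ===== CLAIM (what is proved, stated in full; the proofs are below) =====
def Claim_equal_part1 : Prop := ∀ (rules : List (List Int)) (updates : List (List Int)), Dom_part1 rules updates → Pre_part1 rules updates → Spec_part1 rules updates (part1 rules updates)

-- ===== LEMMAS AND PROOFS =====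

theorem pvMemA_false_iff (bm : PySem.Dict Int (PySem.Set Int)) (q a : Int) :
    pvMemA bm q a = false ↔ q ∉ bm.getD a PySem.Set.empty := by
  unfold pvMemA
  simp [PySem.Set.contains]

theorem pvMemA_true_iff (bm : PySem.Dict Int (PySem.Set Int)) (q a : Int) :
    pvMemA bm q a = true ↔ q ∈ bm.getD a PySem.Set.empty := by
  unfold pvMemA
  simp [PySem.Set.contains]

theorem update_valid_cons (bm : PySem.Dict Int (PySem.Set Int)) (p : Int) (rest : List Int) :
    update_valid bm (p :: rest)
      = (!((p :: rest).any fun after => pvMemA bm p after) && update_valid bm rest) := by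
  by_cases h : ((p :: rest).any fun after => pvMemA bm p after) = true <;>
    simp [update_valid, h]

theorem pvCheckB_cons (bm : PySem.Dict Int (PySem.Set Int)) (seen : PySem.Set Int)
    (p : Int) (rest : List Int) :
    pvCheckB bm seen (p :: rest)
      = (PySem.Set.isdisjoint (PySem.Set.add seen p) (bm.getD p PySem.Set.empty)
          && pvCheckB bm (PySem.Set.add seen p) rest) := by
  by_cases h : PySem.Set.isdisjoint (PySem.Set.add seen p) (bm.getD p PySem.Set.empty) = true <;>
    simp [pvCheckB, h]

-- the two builds agree on every lookup the programs make
theorem pvBuild_getD (rules : List (List Int)) (q : Int) :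
    (pvBuildA rules).getD q PySem.Set.empty = (pvBuildB rules).getD q PySem.Set.empty := by
  suffices h : ∀ (rs : List (List Int)) (d1 d2 : PySem.Dict Int (PySem.Set Int)),
      (∀ k, d1.getD k PySem.Set.empty = d2.getD k PySem.Set.empty) →
      ∀ k, (rs.foldl (fun d rule =>
              let before := (PySem.List.pyGet? rule 0).getD 0
              let after  := (PySem.List.pyGet? rule 1).getD 0
              d.modify before PySem.Set.empty (fun s => s.add after)) d1).getD k PySem.Set.empty
          = (rs.foldl (fun d rule =>
              let b := (PySem.List.pyGet? rule 0).getD 0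
              let a := (PySem.List.pyGet? rule 1).getD 0
              let d' := d.setdefault b PySem.Set.empty
              d'.insert b ((d'.getD b PySem.Set.empty).add a)) d2).getD k PySem.Set.empty by
    exact h rules PySem.Dict.empty PySem.Dict.empty (fun _ => rfl) q
  intro rs
  induction rs with
  | nil => intro d1 d2 h k; exact h k
  | cons r rs ih =>
      intro d1 d2 h k
      simp only [List.foldl_cons]
      apply ih
      intro k'
      by_cases hk : k' = (PySem.List.pyGet? r 0).getD 0
      · subst hk
        have hb := h ((PySem.List.pyGet? r 0).getD 0)
        simp only [PySem.Dict.getD_modify_self, PySem.Dict.getD_insert_self,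
              PySem.Dict.getD_setdefault_self]
        rw [hb]
      · rw [PySem.Dict.getD_modify_of_ne _ _ _ hk, PySem.Dict.getD_insert_of_ne _ _ _ hk]
        have hs : (PySem.Dict.setdefault d2 ((PySem.List.pyGet? r 0).getD 0)
              PySem.Set.empty).getD k' PySem.Set.empty = d2.getD k' PySem.Set.empty := by
          simp only [PySem.Dict.getD, PySem.Dict.get?_setdefault_of_ne _ _ hk]
        rw [hs]
        exact h k'

theorem pvMemA_cong (bm1 bm2 : PySem.Dict Int (PySem.Set Int))
    (h : ∀ k, bm1.getD k PySem.Set.empty = bm2.getD k PySem.Set.empty) (b a : Int) :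
    pvMemA bm1 b a = pvMemA bm2 b a := by
  unfold pvMemA
  rw [h a]

theorem update_valid_cong (bm1 bm2 : PySem.Dict Int (PySem.Set Int))
    (h : ∀ k, bm1.getD k PySem.Set.empty = bm2.getD k PySem.Set.empty) (u : List Int) :
    update_valid bm1 u = update_valid bm2 u := by
  induction u with
  | nil => rfl
  | cons p rest ih =>
      rw [update_valid_cons, update_valid_cons, ih]
      have : ∀ a, pvMemA bm1 p a = pvMemA bm2 p a := pvMemA_cong bm1 bm2 h p
      simp [this]

-- characterisation of B's forward pass: no seen element violates a rule against any page of the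
-- rest, and the update is valid in A's all-pairs sense
theorem pvCheckB_iff (bm : PySem.Dict Int (PySem.Set Int)) (u : List Int) :
    ∀ seen : PySem.Set Int,
      (pvCheckB bm seen u = true ↔
        (∀ a ∈ u, ∀ q ∈ seen, pvMemA bm q a = false) ∧ update_valid bm u = true) := by
  induction u with
  | nil => intro seen; simp [pvCheckB, update_valid]
  | cons p rest ih =>
      intro seen
      rw [pvCheckB_cons, update_valid_cons]
      simp only [Bool.and_eq_true, ih, PySem.Set.isdisjoint_iff, Bool.not_eq_true',
        List.any_eq_false, List.mem_cons, PySem.Set.mem_add, pvMemA_false_iff,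
        pvMemA_true_iff]
      constructor
      · rintro ⟨hdis, hrest, hv⟩
        refine ⟨?_, ?_, hv⟩
        · intro a ha q hq
          rcases ha with ha | ha
          · subst ha; exact hdis q (Or.inl hq)
          · exact hrest a ha q (Or.inl hq)
        · intro a ha
          rcases ha with ha | ha
          · subst ha; exact hdis a (Or.inr rfl)
          · exact hrest a ha p (Or.inr rfl)
      · rintro ⟨hseen, hp, hv⟩
        refine ⟨?_, ?_, hv⟩
        · intro x hx
          rcases hx with hx | hx
          · exact hseen p (Or.inl rfl) x hx
          · rw [hx]; exact hp p (Or.inl rfl)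
        · intro a ha q hq
          rcases hq with hq | hq
          · exact hseen a (Or.inr ha) q hq
          · rw [hq]; exact hp a (Or.inr ha)

theorem pvCheckB_empty (bm : PySem.Dict Int (PySem.Set Int)) (u : List Int) :
    pvCheckB bm PySem.Set.empty u = update_valid bm u := by
  rw [Bool.eq_iff_iff, pvCheckB_iff]
  simp [PySem.Set.empty]

theorem part1_eq (rules : List (List Int)) (updates : List (List Int)) :
    part1 rules updates = part1_alt rules updates := by
  unfold part1 part1_alt
  have hbm : ∀ u, update_valid (pvBuildA rules) u = pvCheckB (pvBuildB rules) PySem.Set.empty u := by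
    intro u
    rw [pvCheckB_empty, update_valid_cong (pvBuildA rules) (pvBuildB rules) (pvBuild_getD rules)]
  have hstep : ∀ (acc : Int) (u : List Int),
      (if !update_valid (pvBuildA rules) u then acc
       else acc + (PySem.List.pyGet? u (PySem.Int.floordiv u.length 2)).getD 0)
        = (if pvCheckB (pvBuildB rules) PySem.Set.empty u then
            acc + (PySem.List.pyGet? u (PySem.Int.floordiv u.length 2)).getD 0
           else acc) := by
    intro acc u
    rw [← hbm u]
    cases update_valid (pvBuildA rules) u <;> simp
  suffices hall : ∀ (us : List (List Int)) (acc : Int),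
      us.foldl (fun sum update =>
        if !update_valid (pvBuildA rules) update then sum
        else sum + (PySem.List.pyGet? update (PySem.Int.floordiv update.length 2)).getD 0) acc
      = us.foldl (fun total update =>
        if pvCheckB (pvBuildB rules) PySem.Set.empty update then
          total + (PySem.List.pyGet? update (PySem.Int.floordiv update.length 2)).getD 0
        else total) acc by
    exact hall updates 0
  intro us
  induction us with
  | nil => intro acc; rfl
  | cons u us ih =>
      intro acc
      simp only [List.foldl_cons]
      rw [hstep acc u, ih]

-- ===== VERDICT (by name: the statement is the Claim_ definition above) =====
theorem part1_spec : Claim_equal_part1 := by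
  intro rules updates _ _
  unfold Spec_part1
  exact part1_eq rules updates
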